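-- pv_equiv track=rewrite | github.com/Apress/python-challenges | ch06_arrays/solutions/ex11_array_min_max_and_pos.py | find_min_pos
-- ===== SOURCE A (Python) =====
-- def find_min_pos(values, start, end):
--     if len(values) == 0:
--         raise ValueError("find_min_pos not supported for empty input")
--     if start < 0 or start > end or end > len(values):
--         raise ValueError("invalid range")
--
--     min_pos = start
--     for i in range(start + 1, end):
--         if values[i] < values[min_pos]:
--             min_pos = i
--
--     return min_pos
-- ===== SOURCE B (Python) =====
-- def find_min_pos(values, start, end):
--     if len(values) == 0:
--         raise ValueError("find_min_pos not supported for empty input")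
--     if start < 0 or start > end or end > len(values):
--         raise ValueError("invalid range")
--     if start == end:
--         return start
--     seg = values[start:end]
--     return start + seg.index(min(seg))
-- ===== Notes on version B (the rewrite author's own statement) =====
-- stated objective: alternative
-- what changed: Replaces A's single fused index-tracking scan with two value-level passes: min() over the slice to get the minimum value, then .index() to find its leftmost occurrence.
import Mathlib
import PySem

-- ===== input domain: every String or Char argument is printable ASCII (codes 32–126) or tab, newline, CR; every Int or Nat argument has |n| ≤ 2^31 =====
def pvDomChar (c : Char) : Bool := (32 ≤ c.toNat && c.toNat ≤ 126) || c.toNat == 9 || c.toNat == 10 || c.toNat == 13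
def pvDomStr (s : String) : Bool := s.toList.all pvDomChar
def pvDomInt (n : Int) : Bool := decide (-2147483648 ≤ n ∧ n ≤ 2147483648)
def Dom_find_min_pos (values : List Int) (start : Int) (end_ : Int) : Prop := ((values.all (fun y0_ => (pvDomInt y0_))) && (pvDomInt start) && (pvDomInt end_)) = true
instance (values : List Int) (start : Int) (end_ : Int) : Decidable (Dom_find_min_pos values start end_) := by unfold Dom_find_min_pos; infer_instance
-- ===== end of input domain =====

-- B replaces A's fused index-tracking scan with two passes: min of the slice, then leftmost index of it.


-- ===== PORT A =====
-- A: a single scan over range(start+1, end) tracking the index of the smallest value seen.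
def find_min_pos (values : List Int) (start : Int) (end_ : Int) : Int :=
  (PySem.List.pyRange (start + 1) end_ 1).foldl
    (fun min_pos i =>
      if PySem.List.pyGetD values i 0 < PySem.List.pyGetD values min_pos 0 then i else min_pos)
    start

-- ===== PORT B =====
-- B: empty range returns start; otherwise min of the slice, then its leftmost index in the slice.
def find_min_pos_alt (values : List Int) (start : Int) (end_ : Int) : Int :=
  if start = end_ then start
  else
    let seg := PySem.List.slice values (some start) (some end_)
    match PySem.List.min? seg (fun x => x) with
    | none => 0  -- unreachable under Pre_: seg is nonempty (min() would raise)
    | some m =>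
      match PySem.List.index? seg m with
      | none => 0  -- unreachable: m ∈ seg
      | some k => start + (k : Int)

-- ===== PRECONDITION & SPEC =====
-- Pre_ is exactly A's two guard clauses: A raises ValueError on empty input or an invalid range.
def Pre_find_min_pos (values : List Int) (start : Int) (end_ : Int) : Prop :=
  values ≠ [] ∧ 0 ≤ start ∧ start ≤ end_ ∧ end_ ≤ (values.length : Int)
instance (values : List Int) (start : Int) (end_ : Int) : Decidable (Pre_find_min_pos values start end_) := by unfold Pre_find_min_pos; infer_instance

def pvWitness_find_min_pos : List Int × Int × Int := ([3, 1, 2, 1], 0, 4)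

def Spec_find_min_pos (values : List Int) (start : Int) (end_ : Int) (out : Int) : Prop := out = find_min_pos_alt values start end_
instance (values : List Int) (start : Int) (end_ : Int) (out : Int) : Decidable (Spec_find_min_pos values start end_ out) := by unfold Spec_find_min_pos; infer_instance

-- ===== CLAIM (what is proved, stated in full; the proofs are below) =====
def Claim_equal_find_min_pos : Prop := ∀ (values : List Int) (start : Int) (end_ : Int), Dom_find_min_pos values start end_ → Pre_find_min_pos values start end_ → Spec_find_min_pos values start end_ (find_min_pos values start end_)

-- ===== LEMMAS AND PROOFS =====

-- loop invariant for A's fold: min_pos stays the leftmost argmin of the prefix scanned so far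
lemma loopA (values : List Int) (start end_ : Int)
    (hlen : end_ ≤ (values.length : Int)) (hs : 0 ≤ start) :
    ∀ (n : Nat) (j mp : Int), j = end_ - n → start ≤ mp → mp < j →
    (∀ i : Int, start ≤ i → i < j → PySem.List.pyGetD values mp 0 ≤ PySem.List.pyGetD values i 0) →
    (∀ i : Int, start ≤ i → i < mp → PySem.List.pyGetD values mp 0 < PySem.List.pyGetD values i 0) →
    ∃ mp', (PySem.List.pyRange j end_ 1).foldl
        (fun min_pos i =>
          if PySem.List.pyGetD values i 0 < PySem.List.pyGetD values min_pos 0 then i else min_pos)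
        mp = mp' ∧ start ≤ mp' ∧ mp' < end_ ∧
      (∀ i : Int, start ≤ i → i < end_ → PySem.List.pyGetD values mp' 0 ≤ PySem.List.pyGetD values i 0) ∧
      (∀ i : Int, start ≤ i → i < mp' → PySem.List.pyGetD values mp' 0 < PySem.List.pyGetD values i 0) := by
  intro n
  induction n with
  | zero =>
    intro j mp hj h1 h2 h4 h5
    have hje : end_ ≤ j := by omega
    refine ⟨mp, ?_, h1, by omega, ?_, h5⟩
    · rw [PySem.List.pyRange_one_eq_nil hje]; rfl
    · intro i hi1 hi2; exact h4 i hi1 (by omega)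
  | succ n ih =>
    intro j mp hj h1 h2 h4 h5
    by_cases hjlt : j < end_
    · rw [PySem.List.pyRange_one_cons hjlt, List.foldl_cons]
      by_cases hc : PySem.List.pyGetD values j 0 < PySem.List.pyGetD values mp 0
      · simp only [hc, if_true]
        refine ih (j + 1) j (by omega) (by omega) (by omega) ?_ ?_
        · intro i hi1 hi2
          by_cases hij : i = j
          · rw [hij]
          · exact le_of_lt (lt_of_lt_of_le hc (h4 i hi1 (by omega)))
        · intro i hi1 hi2
          exact lt_of_lt_of_le hc (h4 i hi1 (by omega))
      · simp only [hc, if_false]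
        refine ih (j + 1) mp (by omega) h1 (by omega) ?_ h5
        · intro i hi1 hi2
          by_cases hij : i = j
          · rw [hij]; omega
          · exact h4 i hi1 (by omega)
    · refine ⟨mp, ?_, h1, by omega, ?_, h5⟩
      · rw [PySem.List.pyRange_one_eq_nil (by omega)]; rfl
      · intro i hi1 hi2; exact h4 i hi1 (by omega)

-- length and elements of the slice values[start:end]
lemma seg_len (values : List Int) (start end_ : Int)
    (hs : 0 ≤ start) (hse : start ≤ end_) (hlen : end_ ≤ (values.length : Int)) :
    (PySem.List.slice values (some start) (some end_)).length = (end_ - start).toNat := by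
  rw [PySem.List.slice_toNat values hs (by omega)]
  simp
  omega

lemma seg_get (values : List Int) (start end_ : Int)
    (hs : 0 ≤ start) (hse : start ≤ end_) (hlen : end_ ≤ (values.length : Int))
    (k : Nat) (hk : k < (PySem.List.slice values (some start) (some end_)).length) :
    (PySem.List.slice values (some start) (some end_))[k]
      = values[start.toNat + k]'(by rw [seg_len values start end_ hs hse hlen] at hk; omega) := by
  have hk' := hk
  rw [seg_len values start end_ hs hse hlen] at hk'
  simp only [PySem.List.slice_toNat values hs (by omega : (0:Int) ≤ end_)]
  rw [List.getElem_take, List.getElem_drop]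

-- B's value-then-index computation lands on the invariant's leftmost argmin
lemma altB (values : List Int) (start end_ : Int) (mp : Int)
    (hs : 0 ≤ start) (hlt : start < end_) (hlen : end_ ≤ (values.length : Int))
    (h1 : start ≤ mp) (h2 : mp < end_)
    (h4 : ∀ i : Int, start ≤ i → i < end_ → PySem.List.pyGetD values mp 0 ≤ PySem.List.pyGetD values i 0)
    (h5 : ∀ i : Int, start ≤ i → i < mp → PySem.List.pyGetD values mp 0 < PySem.List.pyGetD values i 0) :
    find_min_pos_alt values start end_ = mp := by
  have hmp0 : 0 ≤ mp := by omega
  have hmpl : mp < (values.length : Int) := by omega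
  set seg := PySem.List.slice values (some start) (some end_) with hseg
  have hlen' : seg.length = (end_ - start).toNat := seg_len values start end_ hs (by omega) hlen
  have hget : ∀ (k : Nat) (hk : k < seg.length),
      seg[k] = values[start.toNat + k]'(by rw [hlen'] at hk; omega) :=
    fun k hk => seg_get values start end_ hs (by omega) hlen k hk
  have hva : PySem.List.pyGetD values mp 0 = values[mp.toNat]'(by omega) :=
    PySem.List.pyGetD_eq_getElem values 0 hmp0 hmpl
  -- every element of seg is ≥ values[mp]
  have hsegmem : ∀ y ∈ seg, values[mp.toNat]'(by omega) ≤ y := by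
    intro y hy
    obtain ⟨k, hk, hky⟩ := List.mem_iff_getElem.mp hy
    rw [hget k hk] at hky
    rw [← hky, ← hva]
    have hk' : k < (end_ - start).toNat := by rw [hlen'] at hk; omega
    have h := h4 ((start.toNat + k : Nat) : Int) (by omega) (by omega)
    rw [PySem.List.pyGetD_eq_getElem values (i := ((start.toNat + k : Nat) : Int)) 0
        (by omega) (by omega)] at h
    simp only [Int.toNat_natCast] at h
    exact h
  -- values[mp] itself is in seg, at relative index mp - start
  have hkm : mp.toNat - start.toNat < seg.length := by omega
  have hmem : values[mp.toNat]'(by omega) ∈ seg := by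
    rw [List.mem_iff_getElem]
    refine ⟨mp.toNat - start.toNat, hkm, ?_⟩
    rw [hget _ hkm]
    congr 1
    omega
  -- compute B
  obtain ⟨m, hmin⟩ : ∃ m, PySem.List.min? seg (fun x => x) = some m := by
    cases h : PySem.List.min? seg (fun x => x) with
    | none =>
      exfalso
      rw [PySem.List.min?_eq_none_iff] at h
      rw [h] at hkm
      simp at hkm
    | some m => exact ⟨m, rfl⟩
  have hm_mem : m ∈ seg := PySem.List.min?_mem hmin
  have hm_min : ∀ y ∈ seg, m ≤ y := PySem.List.min?_isMin hmin
  have hm_eq : m = values[mp.toNat]'(by omega) :=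
    le_antisymm (hm_min _ hmem) (hsegmem m hm_mem)
  -- index? finds the leftmost occurrence, which is mp - start
  have hidx : PySem.List.index? seg m = some (mp.toNat - start.toNat) := by
    rw [PySem.List.index?_eq_some_iff]
    refine ⟨seg.take (mp.toNat - start.toNat), seg.drop (mp.toNat - start.toNat + 1), ?_, ?_, ?_⟩
    · have hsplit := (List.take_append_drop (mp.toNat - start.toNat) seg).symm
      rw [List.drop_eq_getElem_cons hkm] at hsplit
      have hv : seg[mp.toNat - start.toNat] = m := by
        rw [hget _ hkm, hm_eq]; congr 1; omega
      rw [hv] at hsplit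
      exact hsplit
    · rw [List.length_take]; omega
    · intro hmemtake
      obtain ⟨k, hk, hky⟩ := List.mem_iff_getElem.mp hmemtake
      have hkl : k < mp.toNat - start.toNat := by
        rw [List.length_take] at hk; omega
      have hkseg : k < seg.length := by omega
      rw [List.getElem_take, hget k hkseg, hm_eq] at hky
      have h := h5 ((start.toNat + k : Nat) : Int) (by omega) (by omega)
      rw [hva, PySem.List.pyGetD_eq_getElem values (i := ((start.toNat + k : Nat) : Int)) 0
          (by omega) (by omega)] at h
      simp only [Int.toNat_natCast] at h
      omega
  unfold find_min_pos_alt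
  rw [if_neg (by omega)]
  show (match PySem.List.min? seg (fun x => x) with
       | none => (0 : Int)
       | some m =>
         match PySem.List.index? seg m with
         | none => (0 : Int)
         | some k => start + (k : Int)) = mp
  simp only [hmin, hidx]
  rw [Nat.cast_sub (by omega), Int.toNat_of_nonneg hmp0, Int.toNat_of_nonneg hs]
  ring

-- ===== VERDICT (by name: the statement is the Claim_ definition above) =====
theorem find_min_pos_spec : Claim_equal_find_min_pos := by
  intro values start end_ _ hpre
  obtain ⟨hne, hs, hse, hlen⟩ := hpre
  unfold Spec_find_min_pos
  by_cases heq : start = end_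
  · subst heq
    unfold find_min_pos find_min_pos_alt
    rw [PySem.List.pyRange_one_eq_nil (by omega)]
    simp
  · have hlt : start < end_ := by omega
    have h4init : ∀ i : Int, start ≤ i → i < start + 1 →
        PySem.List.pyGetD values start 0 ≤ PySem.List.pyGetD values i 0 := by
      intro i hi1 hi2
      have hi : i = start := by omega
      rw [hi]
    obtain ⟨mp', hfold, hm1, hm2, hm4, hm5⟩ :=
      loopA values start end_ hlen hs (end_ - (start + 1)).toNat (start + 1) start
        (by omega) (le_refl _) (by omega) h4init (by intro i hi1 hi2; omega)
    unfold find_min_pos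
    rw [hfold, altB values start end_ mp' hs hlt hlen hm1 hm2 hm4 hm5]
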